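-- pv_equiv track=rewrite | github.com/descarteslabs/descarteslabs-python | descarteslabs/core/catalog/scaling.py | common_data_type
-- ===== SOURCE A (Python) =====
-- valid_data_types = ("Byte", "UInt16", "Int16", "UInt32", "Int32", "Float32", "Float64")
--
-- valid_data_type_casts = {
--     "Byte": ("UInt16", "Int16", "UInt32", "Int32", "Float32", "Float64"),
--     "UInt16": ("UInt32", "Int32", "Float32", "Float64"),
--     "Int16": ("Int32", "Float32", "Float64"),
--     "UInt32": ("Float64"),
--     "Int32": ("Float32", "Float64"),
--     "Float32": ("Float64"),
--     "Float64": (),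
-- }
--
-- def common_data_type(data_types):
--     """
--     Return the common (GDAL) data type that all of the given data types can be cast to, or
--     None if there is no common one.
--     """
--     if len(data_types) == 0:
--         return None
--     elif len(data_types) == 1:
--         if data_types[0] not in valid_data_types:
--             raise ValueError("Invalid data type '{}'".format(data_types[0]))
--         return data_types[0]
--     else:
--         dtype1 = common_data_type(data_types[0:-1])
--         if dtype1 is None:
--             return None
--         types1 = valid_data_type_casts[dtype1]
--         dtype2 = data_types[-1]
--         if dtype2 not in valid_data_types:
--             raise ValueError("Invalid data type '{}'".format(dtype2))
--         types2 = valid_data_type_casts[dtype2]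
--         dtype = None
--
--         if dtype1 == dtype2 or dtype1 in types2:
--             dtype = dtype1
--         elif dtype2 in types1:
--             dtype = dtype2
--         else:
--             for dt in types2:
--                 if dt in types1:
--                     dtype = dt
--                     break
--
--         return dtype
-- ===== SOURCE B (Python) =====
-- valid_data_types = ("Byte", "UInt16", "Int16", "UInt32", "Int32", "Float32", "Float64")
--
-- valid_data_type_casts = {
--     "Byte": ("UInt16", "Int16", "UInt32", "Int32", "Float32", "Float64"),
--     "UInt16": ("UInt32", "Int32", "Float32", "Float64"),
--     "Int16": ("Int32", "Float32", "Float64"),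
--     "UInt32": ("Float64"),
--     "Int32": ("Float32", "Float64"),
--     "Float32": ("Float64"),
--     "Float64": (),
-- }
--
--
-- def _combine(acc, dt2):
--     # same combine rule as the original (dict reused unchanged)
--     types1 = valid_data_type_casts[acc]
--     types2 = valid_data_type_casts[dt2]
--     if acc == dt2 or acc in types2:
--         return acc
--     if dt2 in types1:
--         return dt2
--     for dt in types2:
--         if dt in types1:
--             return dt
--     return None
--
--
-- def common_data_type(data_types):
--     """
--     Return the common (GDAL) data type that all of the given data types can be cast to, or
--     None if there is no common one.
--     """
--     if len(data_types) == 0: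
--         return None
--     acc = data_types[0]
--     if acc not in valid_data_types:
--         raise ValueError("Invalid data type '{}'".format(acc))
--     for dt2 in data_types[1:]:
--         if acc is None:
--             return None
--         if dt2 not in valid_data_types:
--             raise ValueError("Invalid data type '{}'".format(dt2))
--         acc = _combine(acc, dt2)
--     return acc
-- ===== Notes on version B (the rewrite author's own statement) =====
-- stated objective: faster
-- what changed: A recurses on data_types[0:-1], copying a slice of the list at every recursion level; B is a single left-to-right loop with an accumulator applying the same combine rule (the valid_data_type_casts dict is reused unchanged, so its string-valued UInt32/Float32 entries behave identically), short-circuiting to None before validating further elements exactly as A does.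
import Mathlib
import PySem

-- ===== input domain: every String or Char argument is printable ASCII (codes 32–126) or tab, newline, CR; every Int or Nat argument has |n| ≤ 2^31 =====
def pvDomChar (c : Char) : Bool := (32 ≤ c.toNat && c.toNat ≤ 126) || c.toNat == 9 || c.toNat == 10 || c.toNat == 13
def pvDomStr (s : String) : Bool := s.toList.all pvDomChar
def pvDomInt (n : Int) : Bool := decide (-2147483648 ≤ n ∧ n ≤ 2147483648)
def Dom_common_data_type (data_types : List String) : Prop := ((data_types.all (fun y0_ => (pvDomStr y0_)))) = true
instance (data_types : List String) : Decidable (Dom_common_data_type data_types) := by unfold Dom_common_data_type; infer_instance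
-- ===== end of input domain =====

-- B replaces A's recursion on data_types[0:-1] (which copies a slice at every recursion level)
-- by a single left-to-right loop with an accumulator and the same combine rule.
-- Equivalence is about the RETURN value; where the Python raises (outside Pre_) nothing is claimed.

-- A Python value that is either a tuple of strings or a single string (the
-- valid_data_type_casts dict mixes both: "UInt32"/"Float32" map to the STRING "Float64").
inductive PyTup where
  | tup : List String → PyTup
  | str : String → PyTup
deriving DecidableEq, Repr

-- Python 'x in t': tuple membership, or SUBSTRING test when t is a str.
def pyMem (x : String) (t : PyTup) : Bool :=
  match t with
  | .tup l => l.contains x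
  | .str s => PySem.Str.isIn x s

-- Python 'for dt in t': tuple elements, or the CHARACTERS (as 1-char strings) of a str.
def pyIter (t : PyTup) : List String :=
  match t with
  | .tup l => l
  | .str s => s.toList.map (fun c => String.ofList [c])

def valid_data_types : List String :=
  ["Byte", "UInt16", "Int16", "UInt32", "Int32", "Float32", "Float64"]

def valid_data_type_casts : PySem.Dict String PyTup :=
  PySem.Dict.ofList
    [ ("Byte", .tup ["UInt16", "Int16", "UInt32", "Int32", "Float32", "Float64"]),
      ("UInt16", .tup ["UInt32", "Int32", "Float32", "Float64"]),
      ("Int16", .tup ["Int32", "Float32", "Float64"]),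
      ("UInt32", .str "Float64"),
      ("Int32", .tup ["Float32", "Float64"]),
      ("Float32", .str "Float64"),
      ("Float64", .tup []) ]

-- ===== PORT A =====
-- 'for dt in types2: if dt in types1: dtype = dt; break' (dtype stays None if no hit)
def forLoopA (dts : List String) (types1 : PyTup) : Option String :=
  match dts with
  | [] => none
  | dt :: rest => if pyMem dt types1 then some dt else forLoopA rest types1

-- KeyError on valid_data_type_casts[k] (reachable only outside Pre_) is modelled by the
-- default (.tup []); 'raise ValueError' is modelled by 'none' (those inputs are outside Pre_).
def common_data_type (data_types : List String) : Option String :=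
  if data_types.length = 0 then none
  else if data_types.length = 1 then
    let d0 := PySem.List.pyGetD data_types 0 ""
    if valid_data_types.contains d0 = false then none
    else some d0
  else
    match common_data_type (PySem.List.slice data_types (some 0) (some (-1))) with
    | none => none
    | some dtype1 =>
      let types1 := PySem.Dict.getD valid_data_type_casts dtype1 (.tup [])
      let dtype2 := PySem.List.pyGetD data_types (-1) ""
      if valid_data_types.contains dtype2 = false then none
      else
        let types2 := PySem.Dict.getD valid_data_type_casts dtype2 (.tup [])
        if dtype1 == dtype2 || pyMem dtype1 types2 then some dtype1
        else if pyMem dtype2 types1 then some dtype2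
        else forLoopA (pyIter types2) types1
termination_by data_types.length
decreasing_by
  simp only [PySem.List.slice_zero_start, PySem.List.slice_to_neg_one, List.length_dropLast]
  omega

-- ===== PORT B =====
-- Source B's _combine helper: the same combine rule, applied to the running accumulator.
def firstCastB (dts : List String) (types1 : PyTup) : Option String :=
  match dts with
  | [] => none
  | dt :: rest => if pyMem dt types1 then some dt else firstCastB rest types1

def combineB (acc dt2 : String) : Option String :=
  let types1 := PySem.Dict.getD valid_data_type_casts acc (.tup [])
  let types2 := PySem.Dict.getD valid_data_type_casts dt2 (.tup [])
  if acc == dt2 || pyMem acc types2 then some acc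
  else if pyMem dt2 types1 then some dt2
  else firstCastB (pyIter types2) types1

-- Source B's 'for dt2 in data_types[1:]' loop ('raise ValueError' modelled by none, as in A's port).
def cdtGo (acc : Option String) (rest : List String) : Option String :=
  match acc, rest with
  | acc, [] => acc
  | none, _ :: _ => none
  | some a, dt2 :: t =>
    if valid_data_types.contains dt2 = false then none
    else cdtGo (combineB a dt2) t

def common_data_type_alt (data_types : List String) : Option String :=
  match data_types with
  | [] => none
  | d0 :: rest =>
    if valid_data_types.contains d0 = false then none
    else cdtGo (some d0) rest

-- ===== PRECONDITION & SPEC =====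
-- Pre_ admits exactly the inputs on which the Python A returns normally: it excludes the
-- lists where A raises — a ValueError on an element not in valid_data_types that the
-- left-to-right validation actually reaches, and a KeyError when the accumulated type has
-- become the 1-char string 'F' (the UInt32/Float32 string-valued dict entries) with more
-- elements still to process.  pvPreS5/SB/SI characterise, in closed form, the prefixes whose
-- accumulated type is Float32 / UInt32 / a signed-int type.
def pvPreS5 : List String := ["Byte", "UInt16", "Int16", "Int32", "Float32"]
def pvPreSB : List String := ["Byte", "UInt16", "UInt32"]
def pvPreSI : List String := ["Byte", "UInt16", "Int16", "Int32"]

-- at index i the accumulator becomes the char-string 'F' (KeyError if i is not last)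
def pvFev (l : List String) (i : Nat) : Prop :=
  (l.getD i "" = "UInt32" ∧ (∀ x ∈ l.take i, x ∈ pvPreS5) ∧ "Float32" ∈ l.take i) ∨
  (l.getD i "" = "Float32" ∧ (∀ x ∈ l.take i, x ∈ pvPreSB) ∧ "UInt32" ∈ l.take i)

-- at index i the accumulator becomes None (A returns None, validating nothing further)
def pvNev (l : List String) (i : Nat) : Prop :=
  l.getD i "" = "UInt32" ∧ (∀ x ∈ l.take i, x ∈ pvPreSI) ∧
    ("Int16" ∈ l.take i ∨ "Int32" ∈ l.take i)

def Pre_common_data_type (data_types : List String) : Prop :=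
  data_types = [] ∨
  (∃ i < data_types.length, pvNev data_types i) ∨
  ((∀ i < data_types.length - 1, ¬ pvFev data_types i) ∧
    (pvFev data_types (data_types.length - 1) ∨ ∀ x ∈ data_types, x ∈ valid_data_types))

instance (data_types : List String) : Decidable (Pre_common_data_type data_types) := by
  unfold Pre_common_data_type pvNev pvFev; infer_instance

def pvWitness_common_data_type : List String := ["UInt16", "Float32", "Byte"]

def Spec_common_data_type (data_types : List String) (out : Option String) : Prop := out = common_data_type_alt data_types
instance (data_types : List String) (out : Option String) : Decidable (Spec_common_data_type data_types out) := by unfold Spec_common_data_type; infer_instance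

-- ===== CLAIM (what is proved, stated in full; the proofs are below) =====
def Claim_equal_common_data_type : Prop := ∀ (data_types : List String), Dom_common_data_type data_types → Pre_common_data_type data_types → Spec_common_data_type data_types (common_data_type data_types)

-- ===== LEMMAS AND PROOFS =====

-- the effect of A's outermost recursion step, as a function of the recursive result
def stepA (acc : Option String) (y : String) : Option String :=
  match acc with
  | none => none
  | some dtype1 =>
    let types1 := PySem.Dict.getD valid_data_type_casts dtype1 (.tup [])
    if valid_data_types.contains y = false then none
    else
      let types2 := PySem.Dict.getD valid_data_type_casts y (.tup [])
      if dtype1 == y || pyMem dtype1 types2 then some dtype1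
      else if pyMem y types1 then some y
      else forLoopA (pyIter types2) types1

theorem firstCastB_eq_forLoopA (dts : List String) (types1 : PyTup) :
    firstCastB dts types1 = forLoopA dts types1 := by
  induction dts with
  | nil => rfl
  | cons dt rest ih => simp [firstCastB, forLoopA, ih]

theorem stepA_some (a y : String) :
    stepA (some a) y =
      if y ∈ valid_data_types then combineB a y else none := by
  simp [stepA, combineB, firstCastB_eq_forLoopA]

theorem common_data_type_append (l : List String) (y : String) (h : l ≠ []) :
    common_data_type (l ++ [y]) = stepA (common_data_type l) y := by
  rw [common_data_type]
  have h0 : ¬ (l ++ [y]).length = 0 := by simp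
  have h1 : ¬ (l ++ [y]).length = 1 := by
    simp only [List.length_append, List.length_singleton]
    have : l.length ≠ 0 := by simpa [List.length_eq_zero_iff] using h
    omega
  simp only [h0, h1, if_false]
  have hslice : PySem.List.slice (l ++ [y]) (some 0) (some (-1)) = l := by
    simp [PySem.List.slice_to_neg_one]
  rw [hslice, PySem.List.pyGetD_neg_one_append_singleton]
  cases hc : common_data_type l with
  | none => simp [stepA]
  | some dtype1 => simp [stepA]

theorem cdtGo_append (y : String) (r : List String) :
    ∀ acc : Option String, cdtGo acc (r ++ [y]) = stepA (cdtGo acc r) y := by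
  induction r with
  | nil =>
    intro acc
    cases acc with
    | none => rfl
    | some a =>
      show cdtGo (some a) [y] = stepA (some a) y
      rw [stepA_some]
      by_cases hy : y ∈ valid_data_types
      · simp [cdtGo, hy]
      · simp [cdtGo, hy]
  | cons z r' ih =>
    intro acc
    cases acc with
    | none => rfl
    | some a =>
      by_cases hz : z ∈ valid_data_types
      · rw [List.cons_append]
        have hL : cdtGo (some a) (z :: (r' ++ [y])) = cdtGo (combineB a z) (r' ++ [y]) := by
          simp [cdtGo, hz]
        have hR : cdtGo (some a) (z :: r') = cdtGo (combineB a z) r' := by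
          simp [cdtGo, hz]
        rw [hL, hR]
        exact ih (combineB a z)
      · have hL : cdtGo (some a) ((z :: r') ++ [y]) = none := by
          simp [cdtGo, hz]
        have hR : cdtGo (some a) (z :: r') = none := by
          simp [cdtGo, hz]
        rw [hL, hR]
        rfl

theorem common_data_type_eq_go (rest : List String) (d0 : String) :
    common_data_type (d0 :: rest) =
      cdtGo (if valid_data_types.contains d0 = false then none else some d0) rest := by
  induction rest using List.reverseRecOn with
  | nil =>
    rw [common_data_type]
    by_cases hv : d0 ∈ valid_data_types <;>
      simp [hv, cdtGo, PySem.List.pyGetD_zero_cons]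
  | append_singleton r y ih =>
    have hsplit : d0 :: (r ++ [y]) = (d0 :: r) ++ [y] := by simp
    rw [hsplit, common_data_type_append (d0 :: r) y (by simp), ih, cdtGo_append]

theorem cdtGo_none (rest : List String) : cdtGo none rest = none := by
  cases rest <;> rfl

-- ===== VERDICT (by name: the statement is the Claim_ definition above) =====
theorem common_data_type_spec : Claim_equal_common_data_type := by
  intro data_types _hdom _hpre
  unfold Spec_common_data_type
  cases data_types with
  | nil => rw [common_data_type]; rfl
  | cons d0 rest =>
    rw [common_data_type_eq_go]
    by_cases hv : d0 ∈ valid_data_types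
    · simp [common_data_type_alt, hv]
    · simp [common_data_type_alt, hv, cdtGo_none]
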